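-- pv_equiv track=rewrite | github.com/choigpt/hscodeclassfiy | src/kb/legal_gate.py | _get_section_for_chapter
-- ===== SOURCE A (Python) =====
-- from typing import Any, Dict, List, Tuple, Optional, Set
--
-- def _get_section_for_chapter(chapter: int) -> Optional[int]:
--     ranges = [
--         (1, 5, 1), (6, 14, 2), (15, 15, 3), (16, 24, 4), (25, 27, 5),
--         (28, 38, 6), (39, 40, 7), (41, 43, 8), (44, 46, 9), (47, 49, 10),
--         (50, 63, 11), (64, 67, 12), (68, 70, 13), (71, 71, 14), (72, 83, 15),
--         (84, 85, 16), (86, 89, 17), (90, 92, 18), (93, 93, 19), (94, 96, 20),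
--         (97, 97, 21), (98, 99, 22),
--     ]
--     for lo, hi, sec in ranges:
--         if lo <= chapter <= hi:
--             return sec
--     return None
-- ===== SOURCE B (Python) =====
-- from typing import Optional
--
-- # Sorted upper bounds of the 22 HS sections: section k covers chapters
-- # (_UPPER_BOUNDS[k-2], _UPPER_BOUNDS[k-1]].  The section number is
-- # 1 + the number of section upper bounds strictly below the chapter.
-- _UPPER_BOUNDS = [5, 14, 15, 24, 27, 38, 40, 43, 46, 49, 63,
--                  67, 70, 71, 83, 85, 89, 92, 93, 96, 97, 99]
--
-- def _get_section_for_chapter(chapter: int) -> Optional[int]: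
--     if not (1 <= chapter <= 99):
--         return None
--     return 1 + sum(1 for h in _UPPER_BOUNDS if h < chapter)
-- ===== Notes on version B (the rewrite author's own statement) =====
-- stated objective: alternative
-- what changed: Replaces the early-return scan over (lo,hi,sec) range triples with an arithmetic rank computation: after a single [1,99] bounds check, the section is 1 plus the count of section upper bounds strictly below the chapter, over a flat sorted list of the 22 upper bounds.
import Mathlib
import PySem

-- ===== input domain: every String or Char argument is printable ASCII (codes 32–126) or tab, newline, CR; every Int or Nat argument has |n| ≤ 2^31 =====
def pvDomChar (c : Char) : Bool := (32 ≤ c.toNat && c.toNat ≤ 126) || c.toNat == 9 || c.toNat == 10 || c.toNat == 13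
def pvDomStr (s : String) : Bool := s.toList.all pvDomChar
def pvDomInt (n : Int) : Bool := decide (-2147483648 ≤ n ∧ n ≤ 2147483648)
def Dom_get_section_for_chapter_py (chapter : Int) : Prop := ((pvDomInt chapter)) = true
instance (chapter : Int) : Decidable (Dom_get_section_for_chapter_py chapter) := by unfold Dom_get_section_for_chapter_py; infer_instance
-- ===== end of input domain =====

-- B replaces A's early-return scan over (lo,hi,sec) triples with a bounds check
-- plus an arithmetic rank: 1 + count of section upper bounds below the chapter.

-- ===== PORT A =====
-- A's loop with early return, as a structural scan over the literal ranges list.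
def pvScanA : List (Int × Int × Int) → Int → Option Int
  | [], _ => none
  | (lo, hi, sec) :: rest, c => if lo ≤ c ∧ c ≤ hi then some sec else pvScanA rest c

def get_section_for_chapter_py (chapter : Int) : Option Int :=
  pvScanA [
    (1, 5, 1), (6, 14, 2), (15, 15, 3), (16, 24, 4), (25, 27, 5),
    (28, 38, 6), (39, 40, 7), (41, 43, 8), (44, 46, 9), (47, 49, 10),
    (50, 63, 11), (64, 67, 12), (68, 70, 13), (71, 71, 14), (72, 83, 15),
    (84, 85, 16), (86, 89, 17), (90, 92, 18), (93, 93, 19), (94, 96, 20),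
    (97, 97, 21), (98, 99, 22)] chapter

-- ===== PORT B =====
def pvUpperBounds : List Int :=
  [5, 14, 15, 24, 27, 38, 40, 43, 46, 49, 63,
   67, 70, 71, 83, 85, 89, 92, 93, 96, 97, 99]

-- sum(1 for h in _UPPER_BOUNDS if h < chapter) as a fold
def get_section_for_chapter_py_alt (chapter : Int) : Option Int :=
  if 1 ≤ chapter ∧ chapter ≤ 99 then
    some (1 + pvUpperBounds.foldl (fun n h => if h < chapter then n + 1 else n) (0 : Int))
  else none

-- ===== PRECONDITION & SPEC =====
def Spec_get_section_for_chapter_py (chapter : Int) (out : Option Int) : Prop := out = get_section_for_chapter_py_alt chapter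
instance (chapter : Int) (out : Option Int) : Decidable (Spec_get_section_for_chapter_py chapter out) := by unfold Spec_get_section_for_chapter_py; infer_instance

-- ===== CLAIM =====
def Claim_equal_get_section_for_chapter_py : Prop := ∀ (chapter : Int), Dom_get_section_for_chapter_py chapter → Spec_get_section_for_chapter_py chapter (get_section_for_chapter_py chapter)

-- ===== LEMMAS AND PROOFS =====
theorem pvScanA_none (rs : List (Int × Int × Int)) (c : Int)
    (hb : ∀ t ∈ rs, 1 ≤ t.1 ∧ t.2.1 ≤ 99) (h : ¬ (1 ≤ c ∧ c ≤ 99)) :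
    pvScanA rs c = none := by
  induction rs with
  | nil => rfl
  | cons t rest ih =>
    obtain ⟨lo, hi, sec⟩ := t
    have hbt := hb (lo, hi, sec) (List.mem_cons_self ..)
    rw [pvScanA, if_neg (by simp at hbt ⊢; omega)]
    exact ih (fun t ht => hb t (List.mem_cons_of_mem _ ht))

theorem pvA_none_of_out (c : Int) (h : ¬ (1 ≤ c ∧ c ≤ 99)) :
    get_section_for_chapter_py c = none := by
  unfold get_section_for_chapter_py
  exact pvScanA_none _ c (by decide) h

-- ===== VERDICT =====
set_option maxRecDepth 16384 in
set_option maxHeartbeats 4000000 in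
theorem get_section_for_chapter_py_spec : Claim_equal_get_section_for_chapter_py := by
  intro c _
  unfold Spec_get_section_for_chapter_py
  by_cases h : 1 ≤ c ∧ c ≤ 99
  · obtain ⟨h1, h2⟩ := h
    interval_cases c <;> decide
  · rw [pvA_none_of_out c h]
    unfold get_section_for_chapter_py_alt
    rw [if_neg h]
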